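/- GENERATED by farm/mkstatement.py from design/units.tsv (unit `DGifDecreaseImageCounter.COMPOSITION`) and the Specs of Gif/Spec/*.lean — do not edit.
   THE STATEMENT of the proof unit `DGifDecreaseImageCounter.COMPOSITION`: the function `DGifDecreaseImageCounter` (70 instructions) satisfies its contract,
   GIVEN THE STATEMENTS OF ITS 4 SEGMENTS (`Gif.Spec.DGifDecreaseImageCounter.Seg<k> Lay μ u₀`: what the unit `DGifDecreaseImageCounter.<k>` proves).
   No machine code is walked: `ReachVia.trans` along the segments (the exit assertion of a segment is the entry assertion of
   its successor), an induction on the loop measures. What the names mean: ProgX/Base/Spec/Basic.lean. The theorem to prove: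
   `theorem DGifDecreaseImageCounter_COMPOSITION_ok : Gif.Spec.DGifDecreaseImageCounter_COMPOSITION.Statement`. -/
import Gif.Code
import Gif.Dec.All
import Gif.Labels
import Gif.Spec.Seg_DGifDecreaseImageCounter
import Gif.Spec.Slurp
namespace Gif.Spec.DGifDecreaseImageCounter_COMPOSITION
open X86 X86.User Asan

/-- The statement of unit `DGifDecreaseImageCounter.COMPOSITION`. -/
def Statement : Prop :=
  ∀ (Lay : Layout) (_hLay : Lay.hi = 0x1000000) (μ : Microarch) (_hμ : UserX.MicroOK μ) (u₀ : State)
    (_h_DGifDecreaseImageCounter_1 : Gif.Spec.DGifDecreaseImageCounter.Seg1 Lay μ u₀)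
    (_h_DGifDecreaseImageCounter_2 : Gif.Spec.DGifDecreaseImageCounter.Seg2 Lay μ u₀)
    (_h_DGifDecreaseImageCounter_3 : Gif.Spec.DGifDecreaseImageCounter.Seg3 Lay μ u₀)
    (_h_DGifDecreaseImageCounter_E : Gif.Spec.DGifDecreaseImageCounter.SegE Lay μ u₀),
    ∀ (H : Heap) (rest : List Obj) (frames : List (Nat × FrameLayout)) (F : Forest) (R : Rd) (init : List Img) (g : Img), Calls Lay μ ProgX.Base.WayInv (ProgX.Base.conv u₀) Gif.L.DGifDecreaseImageCounter.entry (Gif.Spec.DGifDecreaseImageCounter.spec H rest frames F R init g)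

end Gif.Spec.DGifDecreaseImageCounter_COMPOSITION
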